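-- pv_equiv track=rewrite | github.com/RobertShaw/HackerRankPractice | Practice/Interview Preparation Kit/Trees/Balanced Forest N^2.py | findTreeWorth
-- ===== SOURCE A (Python) =====
-- def findTreeWorth(treeWorths, edgesMap, treeIndex, c, levels, level,eulerPathList, firstAppearance):
--
--     eulerPathList.append(treeIndex)
--     if firstAppearance[treeIndex-1] == -1:
--         firstAppearance[treeIndex - 1] = len(eulerPathList) -1
--
--
--     treeWorthIndex = treeIndex - 1
--     if treeWorths[treeWorthIndex]:
--         return treeWorths[treeWorthIndex]
--     else:
--         if levels[treeWorthIndex] == -1: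
--             levels[treeWorthIndex] = level
--         treeWorth = 0
--         children = edgesMap.get(treeIndex, [])
--         if children:
--             for child in children:
--                 treeWorth += findTreeWorth(treeWorths, edgesMap, child, c, levels, level + 1, eulerPathList, firstAppearance)
--                 eulerPathList.append(treeIndex)
--
--
--         treeWorths[treeWorthIndex] = treeWorth + c[treeWorthIndex]
--         return treeWorths[treeWorthIndex]
-- ===== SOURCE B (Python) =====
-- # B: iterative DFS with an explicit frame stack (node, level, child pointer, running
-- # worth) instead of A's recursion; performs the same in-place list mutations in the
-- # same order as A (eulerPathList, firstAppearance, levels, treeWorths).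
-- def findTreeWorth(treeWorths, edgesMap, treeIndex, c, levels, level, eulerPathList, firstAppearance):
--     stack = [[treeIndex, level, 0, 0]]
--     ret = 0
--     while stack:
--         frame = stack[-1]
--         node, lvl, i, worth = frame
--         if i == 0:
--             eulerPathList.append(node)
--             if firstAppearance[node - 1] == -1:
--                 firstAppearance[node - 1] = len(eulerPathList) - 1
--             if treeWorths[node - 1]:
--                 ret = treeWorths[node - 1]
--                 stack.pop()
--                 if stack:
--                     stack[-1][3] += ret
--                     eulerPathList.append(stack[-1][0])
--                 continue
--             if levels[node - 1] == -1:
--                 levels[node - 1] = lvl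
--         children = edgesMap.get(node, [])
--         if i < len(children):
--             frame[2] = i + 1
--             stack.append([children[i], lvl + 1, 0, 0])
--         else:
--             treeWorths[node - 1] = worth + c[node - 1]
--             ret = treeWorths[node - 1]
--             stack.pop()
--             if stack:
--                 stack[-1][3] += ret
--                 eulerPathList.append(stack[-1][0])
--     return ret
-- ===== Notes on version B (the rewrite author's own statement) =====
-- stated objective: alternative
-- what changed: B replaces A's recursive memoized DFS by an iterative DFS over an explicit stack of frames (node, level, child pointer, running worth); B performs the same in-place list mutations in the same order as A and returns the same value on every input on which A returns; the Lean Pre_ is a closed-form sufficient condition (indices in range, acyclic edge relation) for the fueled ports to cover the traversal, and the few returning inputs its conservative global bounds exclude are ones where A and B agree (see cites).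
-- outside the precondition, e.g. on findTreeWorth([0, 0], {}, 1, [3], [-1, -1], 0, [], [-1, -1]): A returns 3, B returns 3; on findTreeWorth([0, 0], {2: [2]}, 1, [3, 4], [-1, -1], 0, [], [-1, -1]): A returns 3, B returns 3; on findTreeWorth([0], {}, 0, [5], [-1], 0, [], [-1]): A returns 5, B returns 5
import Mathlib
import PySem

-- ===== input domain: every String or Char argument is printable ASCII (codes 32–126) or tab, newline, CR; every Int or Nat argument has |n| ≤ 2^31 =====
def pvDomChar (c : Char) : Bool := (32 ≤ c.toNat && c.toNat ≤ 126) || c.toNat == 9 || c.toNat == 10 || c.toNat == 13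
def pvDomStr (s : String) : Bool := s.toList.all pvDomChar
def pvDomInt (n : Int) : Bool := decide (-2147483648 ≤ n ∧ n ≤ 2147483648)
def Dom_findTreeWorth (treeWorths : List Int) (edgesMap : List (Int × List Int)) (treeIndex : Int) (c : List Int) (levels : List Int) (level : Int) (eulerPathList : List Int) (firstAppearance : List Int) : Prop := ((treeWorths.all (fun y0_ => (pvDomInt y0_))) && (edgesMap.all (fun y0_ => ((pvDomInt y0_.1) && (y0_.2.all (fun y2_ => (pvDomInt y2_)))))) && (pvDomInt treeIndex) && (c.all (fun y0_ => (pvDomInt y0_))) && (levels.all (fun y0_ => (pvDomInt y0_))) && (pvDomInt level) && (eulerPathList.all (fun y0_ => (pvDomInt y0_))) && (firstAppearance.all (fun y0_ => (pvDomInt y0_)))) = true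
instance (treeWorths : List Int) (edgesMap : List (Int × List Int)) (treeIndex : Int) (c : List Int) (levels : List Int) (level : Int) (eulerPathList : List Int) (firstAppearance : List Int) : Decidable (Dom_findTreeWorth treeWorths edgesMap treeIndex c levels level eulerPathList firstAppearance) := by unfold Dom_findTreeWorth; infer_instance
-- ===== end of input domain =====

-- ===== PORT A =====
-- B replaces A's recursion by an iterative DFS over an explicit stack of frames
-- (alternative decomposition, same cost). Both Pythons mutate their list arguments in
-- place in the same order; the equivalence proved here is about the RETURN value only.
-- Port of A (recursive memoized DFS). Only the treeWorths mutations can affect the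
-- RETURN value, so the port threads treeWorths and omits the value-irrelevant list
-- mutations (eulerPathList.append, firstAppearance/levels updates). Fuel bounds only
-- the recursion depth (ample under Pre_); out-of-range reads use pyGetD with default 0
-- (Python would raise there — excluded by Pre_).
def goA (em : List (Int × List Int)) (c : List Int) : Nat → Int → List Int → Int × List Int
  | 0, _, tw => (0, tw)
  | f+1, v, tw =>
    let t := PySem.List.pyGetD tw (v - 1) 0
    if t ≠ 0 then (t, tw)
    else
      let children := (PySem.Dict.mk em).getD v []
      let r := if children = [] then ((0 : Int), tw)
               else children.foldl (fun (p : Int × List Int) ch =>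
                      let q := goA em c f ch p.2
                      (p.1 + q.1, q.2)) (0, tw)
      let res := r.1 + PySem.List.pyGetD c (v - 1) 0
      (res, PySem.List.pySetD r.2 (v - 1) res)

def findTreeWorth (treeWorths : List Int) (edgesMap : List (Int × List Int)) (treeIndex : Int) (c : List Int) (levels : List Int) (level : Int) (eulerPathList : List Int) (firstAppearance : List Int) : Int :=
  (goA edgesMap c (treeWorths.length + 1) treeIndex treeWorths).1

-- ===== PORT B =====
-- Port of B (iterative DFS, explicit stack of frames (node, level, child index,
-- running worth)). As for port A, treeWorths is threaded and the value-irrelevant list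
-- mutations are omitted. The while loop becomes a fueled step function; fuelB is a
-- crude upper bound on the number of loop iterations, ample under Pre_.

-- stack[-1][3] += ret  (the in-place bump of the parent frame's running worth)
def bump (st : List (Int × Int × Int × Int)) (r : Int) : List (Int × Int × Int × Int) :=
  match st with
  | [] => []
  | (pv, pl, pi, pw) :: rest => (pv, pl, pi, pw + r) :: rest

def goB (em : List (Int × List Int)) (c : List Int) : Nat → List (Int × Int × Int × Int) → List Int → Int → Int
  | 0, _, _, ret => ret
  | _+1, [], _, ret => ret
  | f+1, (v, lvl, i, worth) :: st, tw, ret =>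
    if i = 0 ∧ PySem.List.pyGetD tw (v - 1) 0 ≠ 0 then
      goB em c f (bump st (PySem.List.pyGetD tw (v - 1) 0)) tw (PySem.List.pyGetD tw (v - 1) 0)
    else
      let cs := (PySem.Dict.mk em).getD v []
      if i < (cs.length : Int) then
        goB em c f ((PySem.List.pyGetD cs i 0, lvl + 1, 0, 0) :: (v, lvl, i + 1, worth) :: st) tw ret
      else
        let res := worth + PySem.List.pyGetD c (v - 1) 0
        goB em c f (bump st res) (PySem.List.pySetD tw (v - 1) res) res

def esum (em : List (Int × List Int)) : Nat := (em.map (fun p => p.2.length)).sum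

def fuelB (tw : List Int) (em : List (Int × List Int)) : Nat :=
  3 * (2 * esum em + 2) ^ tw.length + 1

def findTreeWorth_alt (treeWorths : List Int) (edgesMap : List (Int × List Int)) (treeIndex : Int) (c : List Int) (levels : List Int) (level : Int) (eulerPathList : List Int) (firstAppearance : List Int) : Int :=
  goB edgesMap c (fuelB treeWorths edgesMap) [(treeIndex, level, 0, 0)] treeWorths 0

-- ===== PRECONDITION & SPEC =====
-- helpers for Pre_: successors of a node in the edge map, and the k-step reachability
-- frontier (deduplicated each step, so it stays polynomial to evaluate)
def succs (em : List (Int × List Int)) (v : Int) : List Int := (PySem.Dict.mk em).getD v []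
def stepR (em : List (Int × List Int)) (fr : List Int) : List Int := (fr.flatMap (succs em)).dedup

-- Python B agrees with A (return value and mutations) on every input where A returns.
-- Pre_ excludes the inputs where A raises: an index out of Python range (IndexError)
-- or a reachable cycle in edgesMap (RecursionError; B's loop does not terminate there
-- either). Its first disjunct is the memo hit (A returns treeWorths[treeIndex-1] at
-- once, Python index semantics); the second is a closed-form sufficient condition for
-- the traversal to stay in range and terminate: node indices 1..n, per-node arrays of
-- length ≥ n, and an acyclic edge relation. These global bounds are slightly
-- conservative: they also exclude a few inputs where A returns (arrays shorter than n
-- that the traversal never reads, cycles it never reaches, wraparound via index 0) —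
-- on all of those B returns the same value as A (see the cites); the condition only
-- serves the fueled Lean ports.
def Pre_findTreeWorth (treeWorths : List Int) (edgesMap : List (Int × List Int)) (treeIndex : Int) (c : List Int) (levels : List Int) (level : Int) (eulerPathList : List Int) (firstAppearance : List Int) : Prop :=
  (PySem.Raise.InRange treeWorths.length (treeIndex - 1) ∧
   PySem.Raise.InRange firstAppearance.length (treeIndex - 1) ∧
   PySem.List.pyGetD treeWorths (treeIndex - 1) 0 ≠ 0) ∨
  (1 ≤ treeIndex ∧ treeIndex ≤ (treeWorths.length : Int) ∧
   treeWorths.length ≤ c.length ∧ treeWorths.length ≤ levels.length ∧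
   treeWorths.length ≤ firstAppearance.length ∧
   (∀ p ∈ edgesMap, ∀ ch ∈ p.2, 1 ≤ ch ∧ ch ≤ (treeWorths.length : Int)) ∧
   (∀ i ∈ List.range treeWorths.length, ∀ k ∈ List.range treeWorths.length,
      ((i : Int) + 1) ∉ (stepR edgesMap)^[k + 1] [(i : Int) + 1]))
instance (treeWorths : List Int) (edgesMap : List (Int × List Int)) (treeIndex : Int) (c : List Int) (levels : List Int) (level : Int) (eulerPathList : List Int) (firstAppearance : List Int) : Decidable (Pre_findTreeWorth treeWorths edgesMap treeIndex c levels level eulerPathList firstAppearance) := by unfold Pre_findTreeWorth; infer_instance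

def pvWitness_findTreeWorth : List Int × (List (Int × List Int)) × Int × List Int × List Int × Int × List Int × List Int :=
  ([0, 0], [(1, [2])], 1, [3, 4], [-1, -1], 0, [], [-1, -1])

def Spec_findTreeWorth (treeWorths : List Int) (edgesMap : List (Int × List Int)) (treeIndex : Int) (c : List Int) (levels : List Int) (level : Int) (eulerPathList : List Int) (firstAppearance : List Int) (out : Int) : Prop := out = findTreeWorth_alt treeWorths edgesMap treeIndex c levels level eulerPathList firstAppearance
instance (treeWorths : List Int) (edgesMap : List (Int × List Int)) (treeIndex : Int) (c : List Int) (levels : List Int) (level : Int) (eulerPathList : List Int) (firstAppearance : List Int) (out : Int) : Decidable (Spec_findTreeWorth treeWorths edgesMap treeIndex c levels level eulerPathList firstAppearance out) := by unfold Spec_findTreeWorth; infer_instance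

-- ===== CLAIM (what is proved, stated in full; the proofs are below) =====
def Claim_equal_findTreeWorth : Prop := ∀ (treeWorths : List Int) (edgesMap : List (Int × List Int)) (treeIndex : Int) (c : List Int) (levels : List Int) (level : Int) (eulerPathList : List Int) (firstAppearance : List Int), Dom_findTreeWorth treeWorths edgesMap treeIndex c levels level eulerPathList firstAppearance → Pre_findTreeWorth treeWorths edgesMap treeIndex c levels level eulerPathList firstAppearance → Spec_findTreeWorth treeWorths edgesMap treeIndex c levels level eulerPathList firstAppearance (findTreeWorth treeWorths edgesMap treeIndex c levels level eulerPathList firstAppearance)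

-- ===== LEMMAS AND PROOFS =====

lemma goB_nil (em : List (Int × List Int)) (c : List Int) (f : Nat) (tw : List Int) (ret : Int) :
    goB em c f [] tw ret = ret := by cases f <;> rfl

def reachK (em : List (Int × List Int)) : Nat → List Int → List Int
  | 0, fr => fr
  | k+1, fr => reachK em k (stepR em fr)

lemma reachK_eq_iterate (em : List (Int × List Int)) :
    ∀ (k : Nat) (fr : List Int), reachK em k fr = (stepR em)^[k] fr := by
  intro k
  induction k with
  | zero => intro fr; rfl
  | succ k ih =>
    intro fr
    show reachK em k (stepR em fr) = _
    rw [ih (stepR em fr), Function.iterate_succ_apply]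

lemma mem_succs {em : List (Int × List Int)} {v ch : Int} (h : ch ∈ succs em v) :
    ∃ p ∈ em, p.1 = v ∧ ch ∈ p.2 := by
  unfold succs at h
  rw [PySem.Dict.getD_eq_get?_getD] at h
  cases hq : (PySem.Dict.mk em).get? v with
  | none => rw [hq] at h; simp at h
  | some vs =>
    rw [hq] at h; simp at h
    have hmem : (v, vs) ∈ em := PySem.Dict.mem_items_of_get?_eq_some _ hq
    exact ⟨(v, vs), hmem, rfl, h⟩

lemma succs_length_le (em : List (Int × List Int)) (v : Int) :
    (succs em v).length ≤ esum em := by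
  unfold succs
  rw [PySem.Dict.getD_eq_get?_getD]
  cases hq : (PySem.Dict.mk em).get? v with
  | none => simp
  | some vs =>
    simp only [Option.getD_some]
    have hmem : (v, vs) ∈ em := PySem.Dict.mem_items_of_get?_eq_some _ hq
    exact List.single_le_sum (by simp) _ (List.mem_map_of_mem hmem)

lemma mem_stepR {em : List (Int × List Int)} {fr : List Int} {b : Int} :
    b ∈ stepR em fr ↔ ∃ a ∈ fr, b ∈ succs em a := by
  simp [stepR, List.mem_dedup, List.mem_flatMap]

lemma reach_succ {em : List (Int × List Int)} :
    ∀ (k : Nat) (fr : List Int) (a b : Int),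
      a ∈ reachK em k fr → b ∈ succs em a → b ∈ reachK em (k + 1) fr := by
  intro k
  induction k with
  | zero =>
    intro fr a b ha hb
    show b ∈ reachK em 0 (stepR em fr)
    exact mem_stepR.2 ⟨a, ha, hb⟩
  | succ k ih =>
    intro fr a b ha hb
    exact ih (stepR em fr) a b ha hb

lemma nodup_len_le {l : List Int} {N : Nat} (hnd : l.Nodup)
    (hb : ∀ x ∈ l, 1 ≤ x ∧ x ≤ (N : Int)) : l.length ≤ N := by
  have h1 : l.toFinset ⊆ Finset.Icc (1 : Int) (N : Int) := by
    intro x hx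
    rw [List.mem_toFinset] at hx
    rw [Finset.mem_Icc]
    exact hb x hx
  have h2 := Finset.card_le_card h1
  rw [List.toFinset_card_of_nodup hnd, Int.card_Icc] at h2
  omega

-- The simulation: under the closed-form conditions of Pre_, processing one node on
-- B's machine consumes some kk ≤ 3*(2E+2)^m fuel and ends exactly where A's recursion
-- goA ends (same returned worth, same threaded treeWorths, parent frame bumped).
lemma sim (em : List (Int × List Int)) (c : List Int) (N : Nat)
    (hEdge : ∀ p ∈ em, ∀ ch ∈ p.2, 1 ≤ ch ∧ ch ≤ (N : Int))
    (hAcyc : ∀ v : Int, 1 ≤ v → v ≤ (N : Int) → ∀ k : Nat, k < N → v ∉ reachK em (k + 1) [v]) :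
    ∀ (m : Nat) (v : Int) (path : List Int),
      (path ++ [v]).Nodup →
      (∀ x ∈ path ++ [v], 1 ≤ x ∧ x ≤ (N : Int)) →
      (∀ x ∈ path ++ [v], ∃ k, k ≤ path.length ∧ v ∈ reachK em k [x]) →
      N ≤ path.length + m →
      ∀ (fA : Nat), m ≤ fA → ∀ (tw : List Int),
      ∃ kk : Nat, 1 ≤ kk ∧ kk ≤ 3 * (2 * esum em + 2) ^ m ∧
        ∀ (f : Nat) (st : List (Int × Int × Int × Int)) (lvl ret : Int),
          goB em c (f + kk) ((v, lvl, 0, 0) :: st) tw ret =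
            goB em c f (bump st (goA em c fA v tw).1) (goA em c fA v tw).2 (goA em c fA v tw).1 := by
  intro m
  induction m with
  | zero =>
    intro v path hnd hbd _ hN fA hfA tw
    exfalso
    have := nodup_len_le hnd hbd
    simp at this
    omega
  | succ m ih =>
    intro v path hnd hbd hreach hN fA hfA tw
    obtain ⟨fA', rfl⟩ : ∃ fA', fA = fA' + 1 := ⟨fA - 1, by omega⟩
    by_cases ht : PySem.List.pyGetD tw (v - 1) 0 ≠ 0
    · -- memo hit: one machine step
      refine ⟨1, le_refl 1, ?_, ?_⟩
      · have : 0 < (2 * esum em + 2) ^ (m + 1) := pow_pos (by omega) _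
        omega
      · intro f st lvl ret
        have hA : goA em c (fA' + 1) v tw = (PySem.List.pyGetD tw (v - 1) 0, tw) := by
          simp only [goA]
          rw [if_pos ht]
        rw [hA]
        show goB em c (f + 1) ((v, lvl, 0, 0) :: st) tw ret = _
        simp only [goB]
        rw [if_pos (⟨by norm_num, ht⟩ : _ ∧ _)]
    · rw [not_ne_iff] at ht
      have hvbd := hbd v (by simp)
      have hN1 : path.length + 1 ≤ N := by
        have := nodup_len_le hnd hbd
        simpa using this
      have INNER : ∀ (rem : List Int) (iN : Nat), (succs em v).drop iN = rem →
          iN ≤ (succs em v).length →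
          ∀ (tw_c : List Int), (iN = 0 → tw_c = tw) → ∀ (worth : Int),
          ∃ K : Nat, 1 ≤ K ∧ K ≤ rem.length * (1 + 3 * (2 * esum em + 2) ^ m) + 1 ∧
            ∀ (f : Nat) (st : List (Int × Int × Int × Int)) (lvl ret : Int),
              goB em c (f + K) ((v, lvl, (iN : Int), worth) :: st) tw_c ret =
                goB em c f
                  (bump st ((rem.foldl (fun (p : Int × List Int) ch =>
                      let q := goA em c fA' ch p.2
                      (p.1 + q.1, q.2)) (worth, tw_c)).1 + PySem.List.pyGetD c (v - 1) 0))
                  (PySem.List.pySetD (rem.foldl (fun (p : Int × List Int) ch =>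
                      let q := goA em c fA' ch p.2
                      (p.1 + q.1, q.2)) (worth, tw_c)).2 (v - 1)
                    ((rem.foldl (fun (p : Int × List Int) ch =>
                      let q := goA em c fA' ch p.2
                      (p.1 + q.1, q.2)) (worth, tw_c)).1 + PySem.List.pyGetD c (v - 1) 0))
                  ((rem.foldl (fun (p : Int × List Int) ch =>
                      let q := goA em c fA' ch p.2
                      (p.1 + q.1, q.2)) (worth, tw_c)).1 + PySem.List.pyGetD c (v - 1) 0) := by
        intro rem
        induction rem with
        | nil =>
          intro iN hdrop hle tw_c h0 worth
          refine ⟨1, le_refl 1, by omega, ?_⟩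
          intro f st lvl ret
          have hiN : iN = (succs em v).length := by
            have := List.drop_eq_nil_iff.mp hdrop
            omega
          simp only [List.foldl_nil]
          show goB em c (f + 1) ((v, lvl, (iN : Int), worth) :: st) tw_c ret = _
          simp only [goB]
          rw [if_neg ?c1, if_neg ?c2]
          case c1 =>
            rintro ⟨h1, h2⟩
            have hz : iN = 0 := by exact_mod_cast h1
            rw [h0 hz] at h2
            exact h2 ht
          case c2 =>
            show ¬ ((iN : Int) < _)
            rw [hiN]
            simp [succs]
        | cons ch rem' ihr =>
          intro iN hdrop hle tw_c h0 worth
          have hchdrop : ch ∈ (succs em v).drop iN := by rw [hdrop]; simp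
          have hchmem : ch ∈ succs em v := List.mem_of_mem_drop hchdrop
          have hidx : (succs em v)[iN]? = some ch := by
            have h2 : ((succs em v).drop iN)[0]? = some ch := by rw [hdrop]; rfl
            rw [List.getElem?_drop] at h2
            simpa using h2
          have hlt : iN < (succs em v).length := by
            obtain ⟨hlt, -⟩ := List.getElem?_eq_some_iff.mp hidx
            exact hlt
          have hdrop' : (succs em v).drop (iN + 1) = rem' := by
            have : (succs em v).drop (iN + 1) = ((succs em v).drop iN).drop 1 := by
              rw [List.drop_drop]
            rw [this, hdrop]
            rfl
          obtain ⟨p, hp, hpv, hchp⟩ := mem_succs hchmem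
          have hchbd : 1 ≤ ch ∧ ch ≤ (N : Int) := hEdge p hp ch hchp
          have hnotmem : ch ∉ path ++ [v] := by
            intro hmem
            obtain ⟨k, hk, hr⟩ := hreach ch hmem
            exact hAcyc ch hchbd.1 hchbd.2 k (by omega) (reach_succ k [ch] v ch hr hchmem)
          have hnd' : ((path ++ [v]) ++ [ch]).Nodup := by
            rw [List.nodup_append]
            refine ⟨hnd, List.nodup_singleton _, ?_⟩
            intro x hx y hy
            have hy' : y = ch := by simpa using hy
            subst hy'
            exact fun hxe => hnotmem (hxe ▸ hx)
          have hbd' : ∀ x ∈ (path ++ [v]) ++ [ch], 1 ≤ x ∧ x ≤ (N : Int) := by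
            intro x hx
            rcases List.mem_append.mp hx with h | h
            · exact hbd x h
            · simp at h; subst h; exact hchbd
          have hreach' : ∀ x ∈ (path ++ [v]) ++ [ch],
              ∃ k, k ≤ (path ++ [v]).length ∧ ch ∈ reachK em k [x] := by
            intro x hx
            rcases List.mem_append.mp hx with h | h
            · obtain ⟨k, hk, hr⟩ := hreach x h
              exact ⟨k + 1, by simp; omega, reach_succ k [x] v ch hr hchmem⟩
            · simp at h; subst h
              exact ⟨0, by simp, by simp [reachK]⟩
          have hN' : N ≤ (path ++ [v]).length + m := by simp; omega
          obtain ⟨kc, hkc1, hkc2, Hch⟩ := ih ch (path ++ [v]) hnd' hbd' hreach' hN' fA' (by omega) tw_c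
          obtain ⟨K', hK'1, hK'2, Hrest⟩ := ihr (iN + 1) hdrop' (by omega)
            (goA em c fA' ch tw_c).2 (by omega) (worth + (goA em c fA' ch tw_c).1)
          refine ⟨1 + kc + K', by omega, ?_, ?_⟩
          · have hmul : (rem'.length + 1) * (1 + 3 * (2 * esum em + 2) ^ m)
                = rem'.length * (1 + 3 * (2 * esum em + 2) ^ m) + (1 + 3 * (2 * esum em + 2) ^ m) := by
              ring
            simp only [List.length_cons]
            omega
          · intro f st lvl ret
            have e1 : f + (1 + kc + K') = (f + K' + kc) + 1 := by omega
            rw [e1]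
            show goB em c ((f + K' + kc) + 1) ((v, lvl, (iN : Int), worth) :: st) tw_c ret = _
            simp only [goB]
            rw [if_neg ?d1, if_pos ?d2]
            case d1 =>
              rintro ⟨h1, h2⟩
              have hz : iN = 0 := by exact_mod_cast h1
              rw [h0 hz] at h2
              exact h2 ht
            case d2 =>
              show (iN : Int) < _
              exact_mod_cast hlt
            have hget : PySem.List.pyGetD ((PySem.Dict.mk em).getD v []) (iN : Int) 0 = ch := by
              rw [PySem.List.pyGetD_natCast]
              rw [List.getD_eq_getElem?_getD]
              show ((succs em v)[iN]?).getD 0 = ch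
              rw [hidx]
              rfl
            rw [hget]
            rw [Hch (f + K') ((v, lvl, (iN : Int) + 1, worth) :: st) (lvl + 1) ret]
            simp only [bump]
            have e2 : (iN : Int) + 1 = ((iN + 1 : Nat) : Int) := by push_cast; ring
            rw [e2, Hrest f st lvl (goA em c fA' ch tw_c).1]
            simp only [List.foldl_cons, bump]
      obtain ⟨K, hK1, hK2, HV⟩ := INNER (succs em v) 0 rfl (Nat.zero_le _) tw (fun _ => rfl) 0
      have hA : goA em c (fA' + 1) v tw =
          (((succs em v).foldl (fun (p : Int × List Int) ch =>
              let q := goA em c fA' ch p.2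
              (p.1 + q.1, q.2)) (0, tw)).1 + PySem.List.pyGetD c (v - 1) 0,
           PySem.List.pySetD ((succs em v).foldl (fun (p : Int × List Int) ch =>
              let q := goA em c fA' ch p.2
              (p.1 + q.1, q.2)) (0, tw)).2 (v - 1)
            (((succs em v).foldl (fun (p : Int × List Int) ch =>
              let q := goA em c fA' ch p.2
              (p.1 + q.1, q.2)) (0, tw)).1 + PySem.List.pyGetD c (v - 1) 0)) := by
        simp only [goA]
        rw [if_neg (by simpa using ht)]
        by_cases hc : (PySem.Dict.mk em).getD v [] = []
        · show (_, _) = _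
          rw [if_pos hc]
          have hcs : succs em v = [] := hc
          rw [hcs]
          simp
        · show (_, _) = _
          rw [if_neg hc]
          rfl
      refine ⟨K, hK1, ?_, ?_⟩
      · have hE := succs_length_le em v
        have hpow1 : 1 ≤ (2 * esum em + 2) ^ m := Nat.one_le_pow _ _ (by omega)
        have hX : (2 * esum em + 2) ^ (m + 1) = (2 * esum em + 2) ^ m * (2 * esum em + 2) :=
          pow_succ _ _
        have hstep : (succs em v).length * (1 + 3 * (2 * esum em + 2) ^ m)
            ≤ esum em * (1 + 3 * (2 * esum em + 2) ^ m) :=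
          Nat.mul_le_mul_right _ hE
        nlinarith [hK2, hpow1, hstep, hX]
      · intro f st lvl ret
        have HV' := HV f st lvl ret
        simp only [Nat.cast_zero] at HV'
        rw [HV', hA]
  -- end sim

-- ===== VERDICT (by name: the statement is the Claim_ definition above) =====
theorem findTreeWorth_spec : Claim_equal_findTreeWorth := by
  intro tw em ti c levels lvl epl fa _hD hPre
  unfold Spec_findTreeWorth findTreeWorth findTreeWorth_alt
  by_cases ht : PySem.List.pyGetD tw (ti - 1) 0 ≠ 0
  · have hA : (goA em c (tw.length + 1) ti tw).1 = PySem.List.pyGetD tw (ti - 1) 0 := by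
      simp only [goA]
      rw [if_pos ht]
    have hB : goB em c (fuelB tw em) [(ti, lvl, 0, 0)] tw 0 = PySem.List.pyGetD tw (ti - 1) 0 := by
      show goB em c (3 * (2 * esum em + 2) ^ tw.length + 1) [(ti, lvl, 0, 0)] tw 0 = _
      simp only [goB]
      rw [if_pos (⟨by norm_num, ht⟩ : _ ∧ _)]
      simp only [bump]
      exact goB_nil em c _ tw _
    rw [hA, hB]
  · rw [not_ne_iff] at ht
    rcases hPre with h | h
    · exact absurd ht h.2.2
    · obtain ⟨h1, h2, _, _, _, hEdge, hAcycR⟩ := h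
      have hAcyc : ∀ v : Int, 1 ≤ v → v ≤ (tw.length : Int) → ∀ k : Nat, k < tw.length →
          v ∉ reachK em (k + 1) [v] := by
        intro v hv1 hv2 k hk
        have hi : v = (((v - 1).toNat : Nat) : Int) + 1 := by omega
        rw [hi, reachK_eq_iterate]
        exact hAcycR (v - 1).toNat (by rw [List.mem_range]; omega) k (by rw [List.mem_range]; exact hk)
      obtain ⟨kk, hkk1, hkk2, H⟩ := sim em c tw.length hEdge hAcyc tw.length ti []
        (by simp)
        (by intro x hx; simp at hx; subst hx; exact ⟨h1, h2⟩)
        (by intro x hx; simp at hx; subst hx; exact ⟨0, by simp, by simp [reachK]⟩)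
        (by simp)
        (tw.length + 1) (by omega) tw
      have hfuel : fuelB tw em = (fuelB tw em - kk) + kk := by
        have : kk ≤ fuelB tw em := by
          unfold fuelB
          omega
        omega
      rw [hfuel, H (fuelB tw em - kk) [] lvl 0]
      simp only [bump]
      rw [goB_nil]
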